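-- pv_equiv track=rewrite | github.com/SSANTA11/PYTHONWORKSPACE | practice/beakj/Untitled-1.py | solution
-- ===== SOURCE A (Python) =====
-- def solution(n, w, num):
--     count={}
--     floor=1
--     keep=0
--     for i in range(1,w+1):
--         count[i]=0
--     for j in range(1,n+1):
--         if floor%2!=0:
--             if j%w==0:
--                 count[6]+=1
--                 floor+=1
--                 keep=j
--             else:
--                 count[j%w]+=1
--         elif floor%2==0:
--             if j%w==0:
--                 count[1]+=1
--                 floor+=1
--                 keep=j
--             else:
--                 count[keep-j%w]+=1
--     return count[num]
-- ===== SOURCE B (Python) =====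
-- def solution(n, w, num):
--     # Closed-form snake-fill tally: full rows hit every column once; the
--     # partial row hits column num iff it is reached within the remainder.
--     if num < 1 or num > w:
--         raise ValueError("column out of range")
--     if n <= 0:
--         return 0
--     full, rem = divmod(n, w)
--     if (full + 1) % 2 == 1:
--         hit = num <= rem            # odd row fills left to right
--     else:
--         hit = w - num + 1 <= rem    # even row fills right to left
--     return full + (1 if hit else 0)
-- ===== Notes on version B (the rewrite author's own statement) =====
-- stated objective: faster
-- what changed: B replaces A's per-step simulation (a dict of per-column counters updated for every j in 1..n) with the closed-form snake-fill count: n//w full rows plus one test of whether the partial row reaches column num; B validates the column argument (ValueError outside 1..w); Pre_ is exactly the set of inputs on which A returns (elsewhere A's dict lookups raise KeyError). Intended as faster (O(1) vs O(n)); a timing run measured 12x-1122x but could not confirm under its consistency rule (A raised on most large inputs).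
-- intended difference: On columns 6 and w for n past the first row, on column 1 for n >= 2w-1, and at the single step n = 2w-num of the reverse row, A's hardcoded booking of row ends on column 6 and its off-by-one reverse-row index (keep - j%w, double-booking column 1 and skipping column w) give an off tally, while B returns the true snake-fill count, which is the intended value. — e.g. on solution(7, 6, 6): A returns 1, B returns 2
import Mathlib
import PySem

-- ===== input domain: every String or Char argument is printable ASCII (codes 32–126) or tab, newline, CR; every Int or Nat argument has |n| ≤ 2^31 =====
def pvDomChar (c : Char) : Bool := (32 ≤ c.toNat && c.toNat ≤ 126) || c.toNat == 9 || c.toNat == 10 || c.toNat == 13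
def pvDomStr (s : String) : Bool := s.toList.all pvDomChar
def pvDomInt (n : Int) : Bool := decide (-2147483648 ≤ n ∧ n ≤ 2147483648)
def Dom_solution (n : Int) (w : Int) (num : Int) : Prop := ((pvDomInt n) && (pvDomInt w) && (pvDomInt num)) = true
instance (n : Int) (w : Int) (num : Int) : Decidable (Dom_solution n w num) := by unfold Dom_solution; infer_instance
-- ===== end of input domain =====

-- B replaces A's per-step simulation with the closed-form snake-fill count n//w plus a
-- partial-row test; on columns 1, 6 and w A's hardcoded booking and off-by-one reverse
-- row give a different (wrong) tally, stated below as D_solution.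

set_option maxHeartbeats 1000000


-- ===== PORT A =====
-- count[k] += 1 is ported as insert k (getD k 0 + 1): on the keys A actually touches
-- inside Pre_solution the key is always present, so getD is exact there (a missing key
-- is a KeyError in Python and lies outside Pre_solution).
-- count is a Python dict with int keys; it is ported as Std.HashMap Int Int
-- (same insert/lookup semantics on int keys).
def initA (w : Int) : Std.HashMap Int Int :=
  (PySem.List.pyRange 1 (w + 1) 1).foldl (fun d i => d.insert i 0) ∅

def stepA (w : Int) (s : Std.HashMap Int Int × Int × Int) (j : Int) :
    Std.HashMap Int Int × Int × Int :=
  let count := s.1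
  let floor := s.2.1
  let keep := s.2.2
  if PySem.Int.mod floor 2 ≠ 0 then
    if PySem.Int.mod j w = 0 then
      (count.insert 6 (count.getD 6 0 + 1), floor + 1, j)
    else
      (count.insert (PySem.Int.mod j w) (count.getD (PySem.Int.mod j w) 0 + 1), floor, keep)
  else if PySem.Int.mod floor 2 = 0 then
    if PySem.Int.mod j w = 0 then
      (count.insert 1 (count.getD 1 0 + 1), floor + 1, j)
    else
      (count.insert (keep - PySem.Int.mod j w) (count.getD (keep - PySem.Int.mod j w) 0 + 1),
        floor, keep)
  else (count, floor, keep)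

def solution (n : Int) (w : Int) (num : Int) : Int :=
  let s := (PySem.List.pyRange 1 (n + 1) 1).foldl (stepA w) (initA w, 1, 0)
  s.1.getD num 0

-- ===== PORT B =====
-- literal port of Source B (divmod → floordiv/mod; the boolean hit kept as a Bool;
-- the ValueError branch returns 0 — in Python B raises there, outside Pre_solution)
def solution_alt (n : Int) (w : Int) (num : Int) : Int :=
  if num < 1 ∨ w < num then 0
  else if n ≤ 0 then 0
  else
    let full := PySem.Int.floordiv n w
    let rem := PySem.Int.mod n w
    let hit : Bool :=
      if PySem.Int.mod (full + 1) 2 = 1 then decide (num ≤ rem)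
      else decide (w - num + 1 ≤ rem)
    full + (if hit then 1 else 0)

-- ===== PRECONDITION & SPEC =====
-- Pre_solution is exactly the set of inputs on which A returns: a column num ∈ 1..w
-- and few enough cells that A's dict indexing stays on existing keys — A raises
-- KeyError when num ∉ 1..w, when n ≥ w with w < 6 (count[6] with no key 6), or when
-- n > 3*w (the fourth row indexes keys keep - j % w > w).
def Pre_solution (n : Int) (w : Int) (num : Int) : Prop :=
  1 ≤ num ∧ num ≤ w ∧ (n < w ∨ (6 ≤ w ∧ n ≤ 3 * w))
instance (n : Int) (w : Int) (num : Int) : Decidable (Pre_solution n w num) := by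
  unfold Pre_solution; infer_instance

def pvWitness_solution : Int × Int × Int := (15, 6, 4)

-- A books every row end on the hardcoded column 6 and indexes reverse rows one step
-- early (keep - j % w), so on columns w, 6 and 1 (double-booked) and at the single
-- step n = 2*w - num of the reverse row A returns an off tally, while B returns the
-- true snake-fill count, which is the intended value.
def D_solution (n : Int) (w : Int) (num : Int) : Prop :=
  6 ≤ w ∧ n ≤ 3 * w ∧
    ((num = w ∧ w ≠ 6 ∧ w ≤ n) ∨
     (num = 6 ∧ ((w = 6 ∧ w + 1 ≤ n) ∨ (6 < w ∧ w ≤ n))) ∨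
     (num = 1 ∧ 2 * w - 1 ≤ n) ∨
     (1 < num ∧ num < w ∧ num ≠ 6 ∧ n = 2 * w - num))
instance (n : Int) (w : Int) (num : Int) : Decidable (D_solution n w num) := by
  unfold D_solution; infer_instance

def Spec_solution (n : Int) (w : Int) (num : Int) (out : Int) : Prop :=
  ¬ D_solution n w num → out = solution_alt n w num
instance (n : Int) (w : Int) (num : Int) (out : Int) : Decidable (Spec_solution n w num out) := by
  unfold Spec_solution; infer_instance

def pvDiffWitness_solution : Int × Int × Int := (7, 6, 6)
def pvDiffWitnessOut_solution : Int × Int := (1, 2)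

-- ===== CLAIM =====
def Claim_unchanged_solution : Prop := ∀ (n : Int) (w : Int) (num : Int), Dom_solution n w num → Pre_solution n w num → Spec_solution n w num (solution n w num)
def Claim_changed_solution : Prop := Dom_solution (pvDiffWitness_solution.1) (pvDiffWitness_solution.2.1) (pvDiffWitness_solution.2.2) ∧ Pre_solution (pvDiffWitness_solution.1) (pvDiffWitness_solution.2.1) (pvDiffWitness_solution.2.2) ∧ D_solution (pvDiffWitness_solution.1) (pvDiffWitness_solution.2.1) (pvDiffWitness_solution.2.2) ∧ solution (pvDiffWitness_solution.1) (pvDiffWitness_solution.2.1) (pvDiffWitness_solution.2.2) = pvDiffWitnessOut_solution.1 ∧ solution_alt (pvDiffWitness_solution.1) (pvDiffWitness_solution.2.1) (pvDiffWitness_solution.2.2) = pvDiffWitnessOut_solution.2 ∧ pvDiffWitnessOut_solution.1 ≠ pvDiffWitnessOut_solution.2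
def Claim_exact_solution : Prop := ∀ (n : Int) (w : Int) (num : Int), Dom_solution n w num → Pre_solution n w num → D_solution n w num → solution n w num ≠ solution_alt n w num

-- ===== LEMMAS AND PROOFS =====

lemma hm_getD_insert (m : Std.HashMap Int Int) (k k' v : Int) :
    (m.insert k v).getD k' 0 = if k' = k then v else m.getD k' 0 := by
  rw [Std.HashMap.getD_insert]
  rcases eq_or_ne k' k with h | h
  · subst h; simp
  · rw [if_neg (show ¬((k == k') = true) from by simp [Ne.symm h]), if_neg h]

lemma foldl_insert_zero (l : List Int) (d : Std.HashMap Int Int) (h : ∀ c, d.getD c 0 = 0) :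
    ∀ c, (l.foldl (fun d i => d.insert i 0) d).getD c 0 = 0 := by
  induction l generalizing d with
  | nil => exact h
  | cons x xs ih =>
      intro c
      refine ih _ (fun c => ?_) c
      rw [hm_getD_insert]
      split
      · rfl
      · exact h c

lemma initA_getD (w c : Int) : (initA w).getD c 0 = 0 := by
  unfold initA
  exact foldl_insert_zero _ _ (fun c => by simp) c

-- A's tally for one column, written as the sum of its guarded hit steps
def altCount (n : Int) (w : Int) (num : Int) : Int :=
  (if 1 ≤ num ∧ num < w ∧ num ≤ n then (1 : Int) else 0) +
  (if w ≤ n ∧ num = 6 then (1 : Int) else 0) +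
  (if 1 ≤ num ∧ num < w ∧ 2 * w - num ≤ n then (1 : Int) else 0) +
  (if 2 * w ≤ n ∧ num = 1 then (1 : Int) else 0) +
  (if 1 ≤ num ∧ num < w ∧ 2 * w + num ≤ n then (1 : Int) else 0) +
  (if 3 * w ≤ n ∧ num = 6 then (1 : Int) else 0)

-- value of altCount for non-positive n
lemma alt_nonpos (n w c : Int) (hw : 1 ≤ w) (hn : n ≤ 0) : altCount n w c = 0 := by
  unfold altCount
  split_ifs <;> omega

-- mod helpers (inside Pre_ the divisor w is positive)
lemma mod_small (j w : Int) (h1 : 0 ≤ j) (h2 : j < w) : PySem.Int.mod j w = j := by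
  rw [PySem.Int.mod_eq_emod_of_pos (by omega)]
  exact Int.emod_eq_of_lt h1 h2

lemma mod_sub (j w : Int) (hw : 0 < w) : PySem.Int.mod j w = PySem.Int.mod (j - w) w := by
  rw [PySem.Int.mod_eq_emod_of_pos hw, PySem.Int.mod_eq_emod_of_pos hw, Int.sub_emod_right]

lemma mod_self' (w : Int) (hw : 0 < w) : PySem.Int.mod w w = 0 := by
  rw [PySem.Int.mod_eq_emod_of_pos hw, Int.emod_self]

-- one step of the closed form, by region of j
lemma alt_step1 (w j c : Int) (hw : 1 ≤ w) (h1 : 1 ≤ j) (h2 : j < w) :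
    altCount (j) w c = altCount (j - 1) w c + (if c = j then 1 else 0) := by
  by_cases hc : c = j
  · subst hc
    unfold altCount
    rw [if_pos (show 1 ≤ c ∧ c < w ∧ c ≤ c by omega),
        if_neg (show ¬(1 ≤ c ∧ c < w ∧ c ≤ c - 1) by omega),
        if_neg (show ¬(w ≤ c ∧ c = 6) by omega),
        if_neg (show ¬(w ≤ c - 1 ∧ c = 6) by omega),
        if_neg (show ¬(1 ≤ c ∧ c < w ∧ 2 * w - (c) ≤ c) by omega),
        if_neg (show ¬(1 ≤ c ∧ c < w ∧ 2 * w - (c) ≤ c - 1) by omega),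
        if_neg (show ¬(2 * w ≤ c ∧ c = 1) by omega),
        if_neg (show ¬(2 * w ≤ c - 1 ∧ c = 1) by omega),
        if_neg (show ¬(1 ≤ c ∧ c < w ∧ 2 * w + (c) ≤ c) by omega),
        if_neg (show ¬(1 ≤ c ∧ c < w ∧ 2 * w + (c) ≤ c - 1) by omega),
        if_neg (show ¬(3 * w ≤ c ∧ c = 6) by omega),
        if_neg (show ¬(3 * w ≤ c - 1 ∧ c = 6) by omega)]
    simp only [eq_self_iff_true,
        if_true]
    ring
  · unfold altCount
    simp only [show (1 ≤ c ∧ c < w ∧ c ≤ j) ↔ (1 ≤ c ∧ c < w ∧ c ≤ j - 1) by omega,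
        show (w ≤ j ∧ c = 6) ↔ (w ≤ j - 1 ∧ c = 6) by omega,
        show (1 ≤ c ∧ c < w ∧ 2 * w - (c) ≤ j) ↔ (1 ≤ c ∧ c < w ∧ 2 * w - (c) ≤ j - 1) by omega,
        show (2 * w ≤ j ∧ c = 1) ↔ (2 * w ≤ j - 1 ∧ c = 1) by omega,
        show (1 ≤ c ∧ c < w ∧ 2 * w + (c) ≤ j) ↔ (1 ≤ c ∧ c < w ∧ 2 * w + (c) ≤ j - 1) by omega,
        show (3 * w ≤ j ∧ c = 6) ↔ (3 * w ≤ j - 1 ∧ c = 6) by omega,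
        if_neg hc, add_zero]

lemma alt_step2 (w c : Int) (hw : 6 ≤ w) :
    altCount (w) w c = altCount (w - 1) w c + (if c = 6 then 1 else 0) := by
  by_cases hc : c = 6
  · subst hc
    unfold altCount
    rw [if_pos (show w ≤ w ∧ (6:Int) = 6 by omega),
        if_neg (show ¬(w ≤ w - 1 ∧ (6:Int) = 6) by omega),
        if_neg (show ¬(1 ≤ (6:Int) ∧ (6:Int) < w ∧ 2 * w - ((6:Int)) ≤ w) by omega),
        if_neg (show ¬(1 ≤ (6:Int) ∧ (6:Int) < w ∧ 2 * w - ((6:Int)) ≤ w - 1) by omega),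
        if_neg (show ¬(2 * w ≤ w ∧ (6:Int) = 1) by omega),
        if_neg (show ¬(2 * w ≤ w - 1 ∧ (6:Int) = 1) by omega),
        if_neg (show ¬(1 ≤ (6:Int) ∧ (6:Int) < w ∧ 2 * w + ((6:Int)) ≤ w) by omega),
        if_neg (show ¬(1 ≤ (6:Int) ∧ (6:Int) < w ∧ 2 * w + ((6:Int)) ≤ w - 1) by omega),
        if_neg (show ¬(3 * w ≤ w ∧ (6:Int) = 6) by omega),
        if_neg (show ¬(3 * w ≤ w - 1 ∧ (6:Int) = 6) by omega)]
    simp only [show (1 ≤ (6:Int) ∧ (6:Int) < w ∧ (6:Int) ≤ w) ↔ (1 ≤ (6:Int) ∧ (6:Int) < w ∧ (6:Int) ≤ w - 1) by omega,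
        eq_self_iff_true,
        if_true]
    ring
  · unfold altCount
    simp only [show (1 ≤ c ∧ c < w ∧ c ≤ w) ↔ (1 ≤ c ∧ c < w ∧ c ≤ w - 1) by omega,
        show (w ≤ w ∧ c = 6) ↔ (w ≤ w - 1 ∧ c = 6) by omega,
        show (1 ≤ c ∧ c < w ∧ 2 * w - (c) ≤ w) ↔ (1 ≤ c ∧ c < w ∧ 2 * w - (c) ≤ w - 1) by omega,
        show (2 * w ≤ w ∧ c = 1) ↔ (2 * w ≤ w - 1 ∧ c = 1) by omega,
        show (1 ≤ c ∧ c < w ∧ 2 * w + (c) ≤ w) ↔ (1 ≤ c ∧ c < w ∧ 2 * w + (c) ≤ w - 1) by omega,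
        show (3 * w ≤ w ∧ c = 6) ↔ (3 * w ≤ w - 1 ∧ c = 6) by omega,
        if_neg hc, add_zero]

lemma alt_step3 (w j c : Int) (hw : 6 ≤ w) (h1 : w < j) (h2 : j < 2 * w) :
    altCount (j) w c = altCount (j - 1) w c + (if c = 2 * w - j then 1 else 0) := by
  by_cases hc : c = 2 * w - j
  · subst hc
    unfold altCount
    rw [if_pos (show 1 ≤ 2 * w - j ∧ 2 * w - j < w ∧ 2 * w - j ≤ j by omega),
        if_pos (show 1 ≤ 2 * w - j ∧ 2 * w - j < w ∧ 2 * w - j ≤ j - 1 by omega),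
        if_pos (show 1 ≤ 2 * w - j ∧ 2 * w - j < w ∧ 2 * w - (2 * w - j) ≤ j by omega),
        if_neg (show ¬(1 ≤ 2 * w - j ∧ 2 * w - j < w ∧ 2 * w - (2 * w - j) ≤ j - 1) by omega),
        if_neg (show ¬(2 * w ≤ j ∧ 2 * w - j = 1) by omega),
        if_neg (show ¬(2 * w ≤ j - 1 ∧ 2 * w - j = 1) by omega),
        if_neg (show ¬(1 ≤ 2 * w - j ∧ 2 * w - j < w ∧ 2 * w + (2 * w - j) ≤ j) by omega),
        if_neg (show ¬(1 ≤ 2 * w - j ∧ 2 * w - j < w ∧ 2 * w + (2 * w - j) ≤ j - 1) by omega),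
        if_neg (show ¬(3 * w ≤ j ∧ 2 * w - j = 6) by omega),
        if_neg (show ¬(3 * w ≤ j - 1 ∧ 2 * w - j = 6) by omega)]
    simp only [show (w ≤ j ∧ 2 * w - j = 6) ↔ (w ≤ j - 1 ∧ 2 * w - j = 6) by omega,
        eq_self_iff_true,
        if_true]
    ring
  · unfold altCount
    simp only [show (1 ≤ c ∧ c < w ∧ c ≤ j) ↔ (1 ≤ c ∧ c < w ∧ c ≤ j - 1) by omega,
        show (w ≤ j ∧ c = 6) ↔ (w ≤ j - 1 ∧ c = 6) by omega,
        show (1 ≤ c ∧ c < w ∧ 2 * w - (c) ≤ j) ↔ (1 ≤ c ∧ c < w ∧ 2 * w - (c) ≤ j - 1) by omega,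
        show (2 * w ≤ j ∧ c = 1) ↔ (2 * w ≤ j - 1 ∧ c = 1) by omega,
        show (1 ≤ c ∧ c < w ∧ 2 * w + (c) ≤ j) ↔ (1 ≤ c ∧ c < w ∧ 2 * w + (c) ≤ j - 1) by omega,
        show (3 * w ≤ j ∧ c = 6) ↔ (3 * w ≤ j - 1 ∧ c = 6) by omega,
        if_neg hc, add_zero]

lemma alt_step4 (w c : Int) (hw : 6 ≤ w) :
    altCount (2 * w) w c = altCount (2 * w - 1) w c + (if c = 1 then 1 else 0) := by
  by_cases hc : c = 1
  · subst hc
    unfold altCount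
    rw [if_pos (show 1 ≤ (1:Int) ∧ (1:Int) < w ∧ (1:Int) ≤ 2 * w by omega),
        if_pos (show 1 ≤ (1:Int) ∧ (1:Int) < w ∧ (1:Int) ≤ 2 * w - 1 by omega),
        if_neg (show ¬(w ≤ 2 * w ∧ (1:Int) = 6) by omega),
        if_neg (show ¬(w ≤ 2 * w - 1 ∧ (1:Int) = 6) by omega),
        if_pos (show 1 ≤ (1:Int) ∧ (1:Int) < w ∧ 2 * w - ((1:Int)) ≤ 2 * w by omega),
        if_pos (show 1 ≤ (1:Int) ∧ (1:Int) < w ∧ 2 * w - ((1:Int)) ≤ 2 * w - 1 by omega),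
        if_pos (show 2 * w ≤ 2 * w ∧ (1:Int) = 1 by omega),
        if_neg (show ¬(2 * w ≤ 2 * w - 1 ∧ (1:Int) = 1) by omega),
        if_neg (show ¬(1 ≤ (1:Int) ∧ (1:Int) < w ∧ 2 * w + ((1:Int)) ≤ 2 * w) by omega),
        if_neg (show ¬(1 ≤ (1:Int) ∧ (1:Int) < w ∧ 2 * w + ((1:Int)) ≤ 2 * w - 1) by omega),
        if_neg (show ¬(3 * w ≤ 2 * w ∧ (1:Int) = 6) by omega),
        if_neg (show ¬(3 * w ≤ 2 * w - 1 ∧ (1:Int) = 6) by omega)]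
    simp only [eq_self_iff_true,
        if_true]
    ring
  · unfold altCount
    simp only [show (1 ≤ c ∧ c < w ∧ c ≤ 2 * w) ↔ (1 ≤ c ∧ c < w ∧ c ≤ 2 * w - 1) by omega,
        show (w ≤ 2 * w ∧ c = 6) ↔ (w ≤ 2 * w - 1 ∧ c = 6) by omega,
        show (1 ≤ c ∧ c < w ∧ 2 * w - (c) ≤ 2 * w) ↔ (1 ≤ c ∧ c < w ∧ 2 * w - (c) ≤ 2 * w - 1) by omega,
        show (2 * w ≤ 2 * w ∧ c = 1) ↔ (2 * w ≤ 2 * w - 1 ∧ c = 1) by omega,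
        show (1 ≤ c ∧ c < w ∧ 2 * w + (c) ≤ 2 * w) ↔ (1 ≤ c ∧ c < w ∧ 2 * w + (c) ≤ 2 * w - 1) by omega,
        show (3 * w ≤ 2 * w ∧ c = 6) ↔ (3 * w ≤ 2 * w - 1 ∧ c = 6) by omega,
        if_neg hc, add_zero]

lemma alt_step5 (w j c : Int) (hw : 6 ≤ w) (h1 : 2 * w < j) (h2 : j < 3 * w) :
    altCount (j) w c = altCount (j - 1) w c + (if c = j - 2 * w then 1 else 0) := by
  by_cases hc : c = j - 2 * w
  · subst hc
    unfold altCount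
    rw [if_pos (show 1 ≤ j - 2 * w ∧ j - 2 * w < w ∧ j - 2 * w ≤ j by omega),
        if_pos (show 1 ≤ j - 2 * w ∧ j - 2 * w < w ∧ j - 2 * w ≤ j - 1 by omega),
        if_pos (show 1 ≤ j - 2 * w ∧ j - 2 * w < w ∧ 2 * w - (j - 2 * w) ≤ j by omega),
        if_pos (show 1 ≤ j - 2 * w ∧ j - 2 * w < w ∧ 2 * w - (j - 2 * w) ≤ j - 1 by omega),
        if_pos (show 1 ≤ j - 2 * w ∧ j - 2 * w < w ∧ 2 * w + (j - 2 * w) ≤ j by omega),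
        if_neg (show ¬(1 ≤ j - 2 * w ∧ j - 2 * w < w ∧ 2 * w + (j - 2 * w) ≤ j - 1) by omega),
        if_neg (show ¬(3 * w ≤ j ∧ j - 2 * w = 6) by omega),
        if_neg (show ¬(3 * w ≤ j - 1 ∧ j - 2 * w = 6) by omega)]
    simp only [show (w ≤ j ∧ j - 2 * w = 6) ↔ (w ≤ j - 1 ∧ j - 2 * w = 6) by omega,
        show (2 * w ≤ j ∧ j - 2 * w = 1) ↔ (2 * w ≤ j - 1 ∧ j - 2 * w = 1) by omega,
        eq_self_iff_true,
        if_true]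
    ring
  · unfold altCount
    simp only [show (1 ≤ c ∧ c < w ∧ c ≤ j) ↔ (1 ≤ c ∧ c < w ∧ c ≤ j - 1) by omega,
        show (w ≤ j ∧ c = 6) ↔ (w ≤ j - 1 ∧ c = 6) by omega,
        show (1 ≤ c ∧ c < w ∧ 2 * w - (c) ≤ j) ↔ (1 ≤ c ∧ c < w ∧ 2 * w - (c) ≤ j - 1) by omega,
        show (2 * w ≤ j ∧ c = 1) ↔ (2 * w ≤ j - 1 ∧ c = 1) by omega,
        show (1 ≤ c ∧ c < w ∧ 2 * w + (c) ≤ j) ↔ (1 ≤ c ∧ c < w ∧ 2 * w + (c) ≤ j - 1) by omega,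
        show (3 * w ≤ j ∧ c = 6) ↔ (3 * w ≤ j - 1 ∧ c = 6) by omega,
        if_neg hc, add_zero]

lemma alt_step6 (w c : Int) (hw : 6 ≤ w) :
    altCount (3 * w) w c = altCount (3 * w - 1) w c + (if c = 6 then 1 else 0) := by
  by_cases hc : c = 6
  · subst hc
    unfold altCount
    rw [if_pos (show w ≤ 3 * w ∧ (6:Int) = 6 by omega),
        if_pos (show w ≤ 3 * w - 1 ∧ (6:Int) = 6 by omega),
        if_neg (show ¬(2 * w ≤ 3 * w ∧ (6:Int) = 1) by omega),
        if_neg (show ¬(2 * w ≤ 3 * w - 1 ∧ (6:Int) = 1) by omega),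
        if_pos (show 3 * w ≤ 3 * w ∧ (6:Int) = 6 by omega),
        if_neg (show ¬(3 * w ≤ 3 * w - 1 ∧ (6:Int) = 6) by omega)]
    simp only [show (1 ≤ (6:Int) ∧ (6:Int) < w ∧ (6:Int) ≤ 3 * w) ↔ (1 ≤ (6:Int) ∧ (6:Int) < w ∧ (6:Int) ≤ 3 * w - 1) by omega,
        show (1 ≤ (6:Int) ∧ (6:Int) < w ∧ 2 * w - ((6:Int)) ≤ 3 * w) ↔ (1 ≤ (6:Int) ∧ (6:Int) < w ∧ 2 * w - ((6:Int)) ≤ 3 * w - 1) by omega,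
        show (1 ≤ (6:Int) ∧ (6:Int) < w ∧ 2 * w + ((6:Int)) ≤ 3 * w) ↔ (1 ≤ (6:Int) ∧ (6:Int) < w ∧ 2 * w + ((6:Int)) ≤ 3 * w - 1) by omega,
        eq_self_iff_true,
        if_true]
    ring
  · unfold altCount
    simp only [show (1 ≤ c ∧ c < w ∧ c ≤ 3 * w) ↔ (1 ≤ c ∧ c < w ∧ c ≤ 3 * w - 1) by omega,
        show (w ≤ 3 * w ∧ c = 6) ↔ (w ≤ 3 * w - 1 ∧ c = 6) by omega,
        show (1 ≤ c ∧ c < w ∧ 2 * w - (c) ≤ 3 * w) ↔ (1 ≤ c ∧ c < w ∧ 2 * w - (c) ≤ 3 * w - 1) by omega,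
        show (2 * w ≤ 3 * w ∧ c = 1) ↔ (2 * w ≤ 3 * w - 1 ∧ c = 1) by omega,
        show (1 ≤ c ∧ c < w ∧ 2 * w + (c) ≤ 3 * w) ↔ (1 ≤ c ∧ c < w ∧ 2 * w + (c) ≤ 3 * w - 1) by omega,
        show (3 * w ≤ 3 * w ∧ c = 6) ↔ (3 * w ≤ 3 * w - 1 ∧ c = 6) by omega,
        if_neg hc, add_zero]

-- floor and keep after j completed steps
def floorOf (w j : Int) : Int := if j < w then 1 else if j < 2 * w then 2 else if j < 3 * w then 3 else 4
def keepOf (w j : Int) : Int := if j < w then 0 else if j < 2 * w then w else if j < 3 * w then 2 * w else 3 * w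

lemma loopA_inv (w : Int) (hw : 1 ≤ w) (m : Nat)
    (hm : ((m : Int) ≤ 3 * w ∧ 6 ≤ w) ∨ (m : Int) < w) :
    (∀ c, ((PySem.List.pyRange 1 ((m : Int) + 1) 1).foldl (stepA w) (initA w, 1, 0)).1.getD c 0
        = altCount (m : Int) w c)
    ∧ ((PySem.List.pyRange 1 ((m : Int) + 1) 1).foldl (stepA w) (initA w, 1, 0)).2.1
        = floorOf w (m : Int)
    ∧ ((PySem.List.pyRange 1 ((m : Int) + 1) 1).foldl (stepA w) (initA w, 1, 0)).2.2
        = keepOf w (m : Int) := by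
  induction m with
  | zero =>
      rw [show ((0 : Nat) : Int) + 1 = 1 by norm_num,
        PySem.List.pyRange_one_eq_nil (le_refl 1)]
      refine ⟨fun c => ?_, ?_, ?_⟩
      · simp only [List.foldl_nil]
        rw [initA_getD, alt_nonpos _ _ _ hw (by norm_num)]
      · simp only [List.foldl_nil, floorOf]
        rw [if_pos (by omega)]
      · simp only [List.foldl_nil, keepOf]
        rw [if_pos (by omega)]
  | succ m ih =>
      have hm' : ((m : Int) ≤ 3 * w ∧ 6 ≤ w) ∨ (m : Int) < w := by
        rcases hm with h | h
        · exact Or.inl ⟨by push_cast at h ⊢; omega, h.2⟩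
        · exact Or.inr (by push_cast at h ⊢; omega)
      obtain ⟨ihd, ihf, ihk⟩ := ih hm'
      have hsplit : PySem.List.pyRange 1 (((m + 1 : Nat) : Int) + 1) 1
          = PySem.List.pyRange 1 ((m : Int) + 1) 1 ++ [(m : Int) + 1] := by
        rw [show (((m + 1 : Nat) : Int) + 1) = ((m : Int) + 1) + 1 by push_cast; ring]
        exact PySem.List.pyRange_one_succ_right (by omega)
      rw [hsplit, List.foldl_append]
      set s := (PySem.List.pyRange 1 ((m : Int) + 1) 1).foldl (stepA w) (initA w, 1, 0) with hs
      simp only [List.foldl_cons, List.foldl_nil]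
      rw [show ((m + 1 : Nat) : Int) = (m : Int) + 1 by push_cast; ring]
      set j : Int := (m : Int) + 1 with hj
      have hj1 : 1 ≤ j := by omega
      by_cases r1 : j < w
      · -- row 1 interior: floor 1 (odd), j % w = j ≠ 0, count[j] += 1
        have hf : s.2.1 = 1 := by rw [ihf]; unfold floorOf; split_ifs <;> omega
        have hmod : PySem.Int.mod j w = j := mod_small j w (by omega) r1
        simp only [stepA]
        rw [hf, hmod, if_pos (show PySem.Int.mod 1 2 ≠ 0 by decide),
          if_neg (show ¬(j = 0) by omega)]
        refine ⟨fun c => ?_, ?_, ?_⟩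
        · show (s.1.insert j (s.1.getD j 0 + 1)).getD c 0 = altCount j w c
          rw [hm_getD_insert, alt_step1 w j c hw hj1 r1,
            show j - 1 = (m : Int) from by omega]
          split_ifs with h
          · rw [h, ihd]
          · rw [ihd]; ring
        · show (1 : Int) = floorOf w j
          unfold floorOf; split_ifs <;> omega
        · show s.2.2 = keepOf w j
          rw [ihk]; unfold keepOf; split_ifs <;> omega
      · have hw6 : 6 ≤ w := by
          rcases hm with h | h
          · exact h.2
          · omega
        have hj3 : j ≤ 3 * w := by
          rcases hm with h | h
          · push_cast at h; omega
          · omega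
        by_cases r2 : j = w
        · -- end of row 1: floor 1 (odd), j % w = 0, count[6] += 1, floor := 2, keep := j
          have hf : s.2.1 = 1 := by rw [ihf]; unfold floorOf; split_ifs <;> omega
          have hmod : PySem.Int.mod j w = 0 := by rw [r2]; exact mod_self' w (by omega)
          simp only [stepA]
          rw [hf, hmod, if_pos (show PySem.Int.mod 1 2 ≠ 0 by decide),
            if_pos (rfl : (0 : Int) = 0)]
          refine ⟨fun c => ?_, ?_, ?_⟩
          · show (s.1.insert 6 (s.1.getD 6 0 + 1)).getD c 0 = altCount j w c
            rw [hm_getD_insert, r2, alt_step2 w c hw6,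
              show w - 1 = (m : Int) from by omega]
            split_ifs with h
            · rw [h, ihd]
            · rw [ihd]; ring
          · show (1 + 1 : Int) = floorOf w j
            unfold floorOf; split_ifs <;> omega
          · show j = keepOf w j
            unfold keepOf; split_ifs <;> omega
        · by_cases r3 : j < 2 * w
          · -- row 2 interior: floor 2 (even), j % w = j - w ≠ 0, count[keep - (j-w)] += 1
            have hjw : w < j := by omega
            have hf : s.2.1 = 2 := by
              rw [ihf]; unfold floorOf; split_ifs <;> omega
            have hk : s.2.2 = w := by
              rw [ihk]; unfold keepOf; split_ifs <;> omega
            have hmod : PySem.Int.mod j w = j - w := by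
              rw [mod_sub j w (by omega)]
              exact mod_small _ _ (by omega) (by omega)
            simp only [stepA]
            rw [hf, hk, hmod, if_neg (show ¬(PySem.Int.mod 2 2 ≠ 0) by decide),
              if_pos (show PySem.Int.mod 2 2 = 0 by decide),
              if_neg (show ¬(j - w = 0) by omega)]
            refine ⟨fun c => ?_, ?_, ?_⟩
            · show (s.1.insert (w - (j - w)) (s.1.getD (w - (j - w)) 0 + 1)).getD c 0
                = altCount j w c
              rw [show w - (j - w) = 2 * w - j from by ring, hm_getD_insert,
                alt_step3 w j c hw6 hjw r3, show j - 1 = (m : Int) from by omega]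
              split_ifs with h
              · rw [h, ihd]
              · rw [ihd]; ring
            · show (2 : Int) = floorOf w j
              unfold floorOf; split_ifs <;> omega
            · show w = keepOf w j
              unfold keepOf; split_ifs <;> omega
          · by_cases r4 : j = 2 * w
            · -- end of row 2: floor 2 (even), j % w = 0, count[1] += 1, floor := 3, keep := j
              have hf : s.2.1 = 2 := by
                rw [ihf]; unfold floorOf; split_ifs <;> omega
              have hmod : PySem.Int.mod j w = 0 := by
                rw [mod_sub j w (by omega), show j - w = w from by omega]
                exact mod_self' w (by omega)
              simp only [stepA]
              rw [hf, hmod, if_neg (show ¬(PySem.Int.mod 2 2 ≠ 0) by decide),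
                if_pos (show PySem.Int.mod 2 2 = 0 by decide),
                if_pos (rfl : (0 : Int) = 0)]
              refine ⟨fun c => ?_, ?_, ?_⟩
              · show (s.1.insert 1 (s.1.getD 1 0 + 1)).getD c 0 = altCount j w c
                rw [hm_getD_insert, r4, alt_step4 w c hw6,
                  show 2 * w - 1 = (m : Int) from by omega]
                split_ifs with h
                · rw [h, ihd]
                · rw [ihd]; ring
              · show (2 + 1 : Int) = floorOf w j
                unfold floorOf; split_ifs <;> omega
              · show j = keepOf w j
                unfold keepOf; split_ifs <;> omega
            · by_cases r5 : j < 3 * w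
              · -- row 3 interior: floor 3 (odd), j % w = j - 2w ≠ 0, count[j - 2w] += 1
                have hjw : 2 * w < j := by omega
                have hf : s.2.1 = 3 := by
                  rw [ihf]; unfold floorOf; split_ifs <;> omega
                have hmod : PySem.Int.mod j w = j - 2 * w := by
                  rw [mod_sub j w (by omega), mod_sub _ w (by omega),
                    show j - w - w = j - 2 * w from by ring]
                  exact mod_small _ _ (by omega) (by omega)
                simp only [stepA]
                rw [hf, hmod, if_pos (show PySem.Int.mod 3 2 ≠ 0 by decide),
                  if_neg (show ¬(j - 2 * w = 0) by omega)]
                refine ⟨fun c => ?_, ?_, ?_⟩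
                · show (s.1.insert (j - 2 * w) (s.1.getD (j - 2 * w) 0 + 1)).getD c 0
                    = altCount j w c
                  rw [hm_getD_insert, alt_step5 w j c hw6 hjw r5,
                    show j - 1 = (m : Int) from by omega]
                  split_ifs with h
                  · rw [h, ihd]
                  · rw [ihd]; ring
                · show (3 : Int) = floorOf w j
                  unfold floorOf; split_ifs <;> omega
                · show s.2.2 = keepOf w j
                  rw [ihk]; unfold keepOf; split_ifs <;> omega
              · -- end of row 3: j = 3w, floor 3 (odd), j % w = 0, count[6] += 1
                have r6 : j = 3 * w := by omega
                have hf : s.2.1 = 3 := by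
                  rw [ihf]; unfold floorOf; split_ifs <;> omega
                have hmod : PySem.Int.mod j w = 0 := by
                  rw [mod_sub j w (by omega), mod_sub _ w (by omega),
                    show j - w - w = w from by omega]
                  exact mod_self' w (by omega)
                simp only [stepA]
                rw [hf, hmod, if_pos (show PySem.Int.mod 3 2 ≠ 0 by decide),
                  if_pos (rfl : (0 : Int) = 0)]
                refine ⟨fun c => ?_, ?_, ?_⟩
                · show (s.1.insert 6 (s.1.getD 6 0 + 1)).getD c 0 = altCount j w c
                  rw [hm_getD_insert, r6, alt_step6 w c hw6,
                    show 3 * w - 1 = (m : Int) from by omega]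
                  split_ifs with h
                  · rw [h, ihd]
                  · rw [ihd]; ring
                · show (3 + 1 : Int) = floorOf w j
                  unfold floorOf; split_ifs <;> omega
                · show j = keepOf w j
                  unfold keepOf; split_ifs <;> omega

-- A's dict entry equals altCount on all of Pre_
lemma solution_eq_altCount (n w num : Int) (hpre : Pre_solution n w num) :
    solution n w num = altCount n w num := by
  obtain ⟨hn1, hn2, hreg⟩ := hpre
  have hw : 1 ≤ w := by omega
  by_cases hz : n ≤ 0
  · unfold solution
    rw [PySem.List.pyRange_one_eq_nil (by omega)]
    simp only [List.foldl_nil]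
    rw [initA_getD, alt_nonpos _ _ _ hw hz]
  obtain ⟨m, hmn⟩ : ∃ m : Nat, n = (m : Int) := ⟨n.toNat, by omega⟩
  subst hmn
  have hm : ((m : Int) ≤ 3 * w ∧ 6 ≤ w) ∨ (m : Int) < w := by
    rcases hreg with h | h
    · exact Or.inr h
    · exact Or.inl ⟨h.2, h.1⟩
  exact (loopA_inv w hw m hm).1 num

-- the closed form of B, with floordiv/mod rewritten to ediv/emod and the Bool removed
lemma alt_unfold (n w num : Int) (hw : 0 < w) (hn : ¬ n ≤ 0)
    (h1 : 1 ≤ num) (h2 : num ≤ w) :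
    solution_alt n w num =
      n / w + (if (n / w + 1) % 2 = 1 then (if num ≤ n % w then (1:Int) else 0)
               else (if w - num + 1 ≤ n % w then (1:Int) else 0)) := by
  simp only [solution_alt, if_neg (show ¬(num < 1 ∨ w < num) by omega), if_neg hn,
    PySem.Int.floordiv_eq_ediv_of_pos hw, PySem.Int.mod_eq_emod_of_pos hw,
    PySem.Int.mod_eq_emod_of_pos (show (0:Int) < 2 by norm_num)]
  by_cases hp : (n / w + 1) % 2 = 1 <;> simp [hp]

-- div and mod on the band k*w ≤ n < k*w + w
lemma band_div (n w k : Int) (hw : 0 < w) (h1 : k * w ≤ n) (h2 : n < k * w + w) :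
    n / w = k ∧ n % w = n - k * w := by
  have e1 : n / w = (n - k * w) / w + k := by
    conv_lhs => rw [show n = (n - k * w) + k * w by ring]
    exact Int.add_mul_ediv_right _ _ (by omega)
  have e2 : (n - k * w) / w = 0 := Int.ediv_eq_zero_of_lt (by omega) (by omega)
  have e3 : n % w = (n - k * w) % w := by
    conv_lhs => rw [show n = (n - k * w) + k * w by ring]
    exact Int.add_mul_emod_self_right _ k w
  have e4 : (n - k * w) % w = n - k * w := Int.emod_eq_of_lt (by omega) (by omega)
  exact ⟨by omega, by omega⟩

-- on Pre_ outside D_ the two tallies agree …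
lemma bridge_eq (n w num : Int) (hpre : Pre_solution n w num)
    (hD : ¬ D_solution n w num) : altCount n w num = solution_alt n w num := by
  obtain ⟨hn1, hn2, hreg⟩ := hpre
  have hw : 0 < w := by omega
  by_cases hz : n ≤ 0
  · rw [alt_nonpos n w num (by omega) hz]
    simp only [solution_alt, if_neg (show ¬(num < 1 ∨ w < num) by omega), if_pos hz]
  · rw [alt_unfold n w num hw hz hn1 hn2]
    unfold D_solution at hD
    unfold altCount
    by_cases b1 : n < w
    · obtain ⟨hq, hr⟩ := band_div n w 0 hw (by omega) (by omega)
      rw [hq, hr]; split_ifs <;> omega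
    · have hw6 : 6 ≤ w := by omega
      have hn3 : n ≤ 3 * w := by omega
      by_cases b2 : n < 2 * w
      · obtain ⟨hq, hr⟩ := band_div n w 1 hw (by omega) (by omega)
        rw [hq, hr]; split_ifs <;> omega
      · by_cases b3 : n < 3 * w
        · obtain ⟨hq, hr⟩ := band_div n w 2 hw (by omega) (by omega)
          rw [hq, hr]; split_ifs <;> omega
        · obtain ⟨hq, hr⟩ := band_div n w 3 hw (by omega) (by omega)
          rw [hq, hr]; split_ifs <;> omega

-- … and inside D_ they differ
lemma bridge_ne (n w num : Int) (hpre : Pre_solution n w num)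
    (hD : D_solution n w num) : altCount n w num ≠ solution_alt n w num := by
  obtain ⟨hn1, hn2, hreg⟩ := hpre
  have hw : 0 < w := by omega
  unfold D_solution at hD
  have hz : ¬ n ≤ 0 := by omega
  rw [alt_unfold n w num hw hz hn1 hn2]
  unfold altCount
  by_cases b1 : n < w
  · exact absurd hD (by omega)
  · have hw6 : 6 ≤ w := by omega
    have hn3 : n ≤ 3 * w := by omega
    by_cases b2 : n < 2 * w
    · obtain ⟨hq, hr⟩ := band_div n w 1 hw (by omega) (by omega)
      rw [hq, hr]; split_ifs <;> omega
    · by_cases b3 : n < 3 * w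
      · obtain ⟨hq, hr⟩ := band_div n w 2 hw (by omega) (by omega)
        rw [hq, hr]; split_ifs <;> omega
      · obtain ⟨hq, hr⟩ := band_div n w 3 hw (by omega) (by omega)
        rw [hq, hr]; split_ifs <;> omega

-- ===== VERDICT (by name: the statements are the Claim_ definitions above) =====
theorem solution_spec : Claim_unchanged_solution := by
  intro n w num hdom hpre
  unfold Spec_solution
  intro hD
  rw [solution_eq_altCount n w num hpre]
  exact bridge_eq n w num hpre hD

theorem solution_changed : Claim_changed_solution := by
  unfold Claim_changed_solution
  refine ⟨by decide, by decide, by decide, ?_, by decide, by decide⟩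
  rw [show solution (pvDiffWitness_solution.1) (pvDiffWitness_solution.2.1) (pvDiffWitness_solution.2.2) = solution 7 6 6 from rfl,
    solution_eq_altCount 7 6 6 (by decide)]
  decide

theorem solution_tight : Claim_exact_solution := by
  intro n w num hdom hpre hD
  rw [solution_eq_altCount n w num hpre]
  exact bridge_ne n w num hpre hD
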